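-- pv_equiv track=rewrite | github.com/Dudutonetto/FIS02020 | FIS02020_strings.py | sintax
-- ===== SOURCE A (Python) =====
-- def sintax(obj_name):
--     if len(obj_name) != 23:
--         return False
--     if not obj_name.startswith("SDSSJ"):
--         return False
--     for i in range(5,11):
--         if not obj_name[i].isdigit():
--             return False
--     if not obj_name[11] in (".", ","):
--             return False
--     for i in range(12,14):
--         if not obj_name[i].isdigit():
--             return False
--     if not obj_name[14] in ['+','-']:
--         return False
--     for i in range(15,21):
--        if not obj_name[i].isdigit():
--            return False
--     if not obj_name[21] in (".", ","):
--         return False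
--     if not obj_name[22].isdigit():
--        return False
--     else:
--         return True
-- ===== SOURCE B (Python) =====
-- GRAMMAR = [("lit", "SDSSJ"), ("digits", 6), ("oneof", ".,"), ("digits", 2),
--            ("oneof", "+-"), ("digits", 6), ("oneof", ".,"), ("digits", 1)]
--
--
-- def _match(s, grammar):
--     # recursive-descent: consume the string token by token; succeed iff fully consumed
--     if not grammar:
--         return s == ""
--     kind, arg = grammar[0]
--     if kind == "lit":
--         return s.startswith(arg) and _match(s[len(arg):], grammar[1:])
--     if kind == "digits":
--         return len(s) >= arg and s[:arg].isdigit() and _match(s[arg:], grammar[1:])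
--     return len(s) >= 1 and s[0] in arg and _match(s[1:], grammar[1:])
--
--
-- def sintax(obj_name):
--     return _match(obj_name, GRAMMAR)
-- ===== Notes on version B (the rewrite author's own statement) =====
-- stated objective: alternative
-- what changed: Replaces A's upfront length check plus eight fixed index-based checks by a recursive-descent consumer that eats the string token by token against a declarative grammar (literal, digit-run, one-of-set) and succeeds only when the string is fully consumed.
import Mathlib
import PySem

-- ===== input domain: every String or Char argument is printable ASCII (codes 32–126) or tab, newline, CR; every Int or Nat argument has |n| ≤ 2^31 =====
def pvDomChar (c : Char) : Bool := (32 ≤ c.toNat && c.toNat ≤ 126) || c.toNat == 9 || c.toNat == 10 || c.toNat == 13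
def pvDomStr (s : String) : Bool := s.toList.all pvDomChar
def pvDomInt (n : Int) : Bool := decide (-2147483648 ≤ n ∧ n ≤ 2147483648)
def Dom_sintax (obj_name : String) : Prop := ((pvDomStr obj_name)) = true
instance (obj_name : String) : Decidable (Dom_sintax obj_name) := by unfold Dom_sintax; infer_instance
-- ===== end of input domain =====

-- B replaces A's fixed sequence of index-based checks by a recursive-descent consumer
-- driven by a token grammar (objective: alternative decomposition, same cost).

-- ===== PORT A =====
-- obj_name[i].isdigit() with i guarded in range by the length check; none never occurs there
def sintaxDigitAt (cs : List Char) (i : Int) : Bool :=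
  ((PySem.List.pyGet? cs i).map PySem.Chars.isdigit).getD false

-- obj_name[i] (guarded in range by the length check; default never used)
def sintaxCharAt (cs : List Char) (i : Int) : Char :=
  (PySem.List.pyGet? cs i).getD ' '

def sintaxList (cs : List Char) : Bool :=
  if cs.length ≠ 23 then false
  else if !(PySem.Chars.startswith cs ['S','D','S','S','J']) then false
  else if !((PySem.List.pyRange 5 11 1).all fun i => sintaxDigitAt cs i) then false
  else if !(sintaxCharAt cs 11 == '.' || sintaxCharAt cs 11 == ',') then false
  else if !((PySem.List.pyRange 12 14 1).all fun i => sintaxDigitAt cs i) then false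
  else if !(sintaxCharAt cs 14 == '+' || sintaxCharAt cs 14 == '-') then false
  else if !((PySem.List.pyRange 15 21 1).all fun i => sintaxDigitAt cs i) then false
  else if !(sintaxCharAt cs 21 == '.' || sintaxCharAt cs 21 == ',') then false
  else if !(sintaxDigitAt cs 22) then false
  else true

def sintax (obj_name : String) : Bool := sintaxList obj_name.toList

-- ===== PORT B =====
-- one grammar token: a literal string, a run of n digits, or one char from a set
inductive SinTok where
  | lit : List Char → SinTok
  | digits : Nat → SinTok
  | oneof : List Char → SinTok
deriving DecidableEq, Repr

def sinGrammar : List SinTok :=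
  [SinTok.lit ['S','D','S','S','J'], SinTok.digits 6, SinTok.oneof ['.', ','],
   SinTok.digits 2, SinTok.oneof ['+','-'], SinTok.digits 6,
   SinTok.oneof ['.', ','], SinTok.digits 1]

-- _match: s[k:] with k ≥ 0 is List.drop k, s[:k] is List.take k (exact for nonneg k);
-- s[:k].isdigit() is PySem.Chars.strIsdigit; s[0] in arg is membership in the char list
def sinMatch : List Char → List SinTok → Bool
  | s, [] => s == []
  | s, SinTok.lit w :: rest =>
      PySem.Chars.startswith s w && sinMatch (s.drop w.length) rest
  | s, SinTok.digits n :: rest =>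
      decide (n ≤ s.length) && PySem.Chars.strIsdigit (s.take n) && sinMatch (s.drop n) rest
  | s, SinTok.oneof cs :: rest =>
      decide (1 ≤ s.length) && cs.contains ((s.headD ' ')) && sinMatch (s.drop 1) rest

def sintax_alt (obj_name : String) : Bool := sinMatch obj_name.toList sinGrammar

-- ===== PRECONDITION & SPEC =====
def Spec_sintax (obj_name : String) (out : Bool) : Prop := out = sintax_alt obj_name
instance (obj_name : String) (out : Bool) : Decidable (Spec_sintax obj_name out) := by unfold Spec_sintax; infer_instance

-- ===== CLAIM (what is proved, stated in full; the proofs are below) =====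
def Claim_equal_sintax : Prop := ∀ (obj_name : String), Dom_sintax obj_name → Spec_sintax obj_name (sintax obj_name)

-- ===== LEMMAS AND PROOFS =====

-- total length consumed by a grammar
def sinTokLen : SinTok → Nat
  | SinTok.lit w => w.length
  | SinTok.digits n => n
  | SinTok.oneof _ => 1

theorem sinMatch_length (g : List SinTok) (s : List Char)
    (h : sinMatch s g = true) : s.length = (g.map sinTokLen).sum := by
  induction g generalizing s with
  | nil =>
      simp [sinMatch] at h; simp [h]
  | cons t rest ih =>
      cases t with
      | lit w =>
          simp [sinMatch, Bool.and_eq_true, PySem.Chars.startswith_iff] at h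
          obtain ⟨hp, hm⟩ := h
          have hlen : w.length ≤ s.length := hp.length_le
          have := ih _ hm
          simp at this
          simp [sinTokLen]; omega
      | digits n =>
          simp [sinMatch, Bool.and_eq_true] at h
          obtain ⟨⟨hn, _⟩, hm⟩ := h
          have := ih _ hm
          simp at this
          simp [sinTokLen]; omega
      | oneof cs =>
          simp [sinMatch, Bool.and_eq_true] at h
          obtain ⟨⟨hn, _⟩, hm⟩ := h
          have := ih _ hm
          simp at this
          simp [sinTokLen]; omega

set_option maxHeartbeats 2000000 in
theorem sintax_eq23 (c0 c1 c2 c3 c4 c5 c6 c7 c8 c9 c10 c11 c12 c13 c14 c15 c16 c17 c18 c19 c20 c21 c22 : Char) :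
    sintaxList [c0,c1,c2,c3,c4,c5,c6,c7,c8,c9,c10,c11,c12,c13,c14,c15,c16,c17,c18,c19,c20,c21,c22]
      = sinMatch [c0,c1,c2,c3,c4,c5,c6,c7,c8,c9,c10,c11,c12,c13,c14,c15,c16,c17,c18,c19,c20,c21,c22] sinGrammar := by
  have r1 : PySem.List.pyRange 5 11 1 = [5,6,7,8,9,10] := by decide
  have r2 : PySem.List.pyRange 12 14 1 = [12,13] := by decide
  have r3 : PySem.List.pyRange 15 21 1 = [15,16,17,18,19,20] := by decide
  rw [Bool.eq_iff_iff]
  simp only [sintaxList, sinMatch, sinGrammar, sintaxDigitAt, sintaxCharAt, r1, r2, r3,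
    PySem.Chars.startswith, PySem.Chars.strIsdigit, List.take, List.drop,
    List.all_cons, List.all_nil, List.length_cons, List.length_nil]
  simp [PySem.List.pyGet?, PySem.List.pyIdx?]

theorem sintax_eq_list (cs : List Char) : sintaxList cs = sinMatch cs sinGrammar := by
  by_cases h : cs.length = 23
  · rcases cs with _|⟨c0,_|⟨c1,_|⟨c2,_|⟨c3,_|⟨c4,_|⟨c5,_|⟨c6,_|⟨c7,_|⟨c8,_|⟨c9,_|⟨c10,_|⟨c11,_|⟨c12,_|⟨c13,_|⟨c14,_|⟨c15,_|⟨c16,_|⟨c17,_|⟨c18,_|⟨c19,_|⟨c20,_|⟨c21,_|⟨c22,_|⟨c23,tl⟩⟩⟩⟩⟩⟩⟩⟩⟩⟩⟩⟩⟩⟩⟩⟩⟩⟩⟩⟩⟩⟩⟩⟩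
    all_goals first
      | (exfalso; simp only [List.length_cons, List.length_nil] at h; omega)
      | exact sintax_eq23 c0 c1 c2 c3 c4 c5 c6 c7 c8 c9 c10 c11 c12 c13 c14 c15 c16 c17 c18 c19 c20 c21 c22
  · have hb : sinMatch cs sinGrammar = false := by
      cases hm : sinMatch cs sinGrammar with
      | false => rfl
      | true =>
          have hlen := sinMatch_length sinGrammar cs hm
          simp [sinGrammar, sinTokLen] at hlen
          omega
    simp [sintaxList, h, hb]

-- ===== VERDICT (by name: the statement is the Claim_ definition above) =====
theorem sintax_spec : Claim_equal_sintax := by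
  intro o _
  unfold Spec_sintax sintax sintax_alt
  exact sintax_eq_list o.toList
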